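-- pv_equiv track=rewrite | github.com/suuppon/AlgorithmPS | 백준/Gold/3020. 개똥벌레/개똥벌레.py | count_obstacle
-- ===== SOURCE A (Python) =====
-- def count_obstacle(array, target_height):
--     start, end = 0, len(array) -1
--
--     while start <= end:
--         mid = (start + end) // 2
--
--         elt = array[mid]
--
--         if elt < target_height:
--             start = mid + 1
--         else:
--             end = mid - 1
--
--     return start
-- ===== SOURCE B (Python) =====
-- def count_obstacle(array, target_height):
--     # Same probe sequence as A, but decomposed as recursion on the window SIZE
--     # (number of remaining candidates) instead of a while loop over (start, end).
--     def go(start, size):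
--         if size == 0:
--             return start
--         half = (size - 1) // 2
--         mid = start + half
--         if array[mid] < target_height:
--             return go(mid + 1, size - 1 - half)
--         return go(start, half)
--     return go(0, len(array))
-- ===== Notes on version B (the rewrite author's own statement) =====
-- stated objective: alternative
-- what changed: A's while loop over mutable inclusive bounds (start, end) is replaced by a recursive helper go(start, size) over the remaining window SIZE, computing the midpoint as start + (size-1)//2 and recursing on the half sizes; same probe sequence, different state and decomposition.
import Mathlib
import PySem

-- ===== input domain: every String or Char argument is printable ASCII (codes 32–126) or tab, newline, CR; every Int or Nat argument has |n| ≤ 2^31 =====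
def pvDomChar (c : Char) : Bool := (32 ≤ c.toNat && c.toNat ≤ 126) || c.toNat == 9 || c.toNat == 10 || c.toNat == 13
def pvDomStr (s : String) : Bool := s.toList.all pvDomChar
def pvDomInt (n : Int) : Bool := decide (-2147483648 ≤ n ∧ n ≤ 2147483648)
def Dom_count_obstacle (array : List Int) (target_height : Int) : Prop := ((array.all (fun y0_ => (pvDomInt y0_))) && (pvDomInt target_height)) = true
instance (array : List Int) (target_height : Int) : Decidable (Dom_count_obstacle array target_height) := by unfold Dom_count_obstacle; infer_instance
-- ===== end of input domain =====

-- B replaces A's while loop over mutable (start, end) bounds by recursion on the remaining window SIZE; same probe sequence, different decomposition.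


-- ===== PORT A =====
-- A's while loop over mutable (start, end). The inclusive window shrinks by at least one
-- element per iteration (mid lies inside it), so fuel = length + 1 is never exhausted; the
-- fuel is only a structural-termination guard, not part of A's algorithm. array[mid] is
-- always in range at reachable states (0 ≤ start ≤ mid ≤ end ≤ len-1), so .getD 0 never fires.
def pvLoopA (array : List Int) (target_height : Int) : Nat → Int → Int → Int
  | 0, start, _ => start
  | fuel + 1, start, e =>
    if start ≤ e then
      let mid := PySem.Int.floordiv (start + e) 2
      let elt := (PySem.List.pyGet? array mid).getD 0
      if elt < target_height then pvLoopA array target_height fuel (mid + 1) e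
      else pvLoopA array target_height fuel start (mid - 1)
    else start

def count_obstacle (array : List Int) (target_height : Int) : Int :=
  pvLoopA array target_height (array.length + 1) 0 ((array.length : Int) - 1)

-- ===== PORT B =====
-- B's helper go(start, size): recursion on the window size (a Nat), so termination is by the
-- size argument itself — no fuel. mid = start + (size-1)//2; recurse on the half sizes.
def pvGoB (array : List Int) (target_height : Int) : Int → Nat → Int
  | start, 0 => start
  | start, n + 1 =>
    let half := n / 2
    let mid := start + (half : Int)
    if (PySem.List.pyGet? array mid).getD 0 < target_height then
      pvGoB array target_height (mid + 1) (n - half)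
    else
      pvGoB array target_height start half
  termination_by _ n => n
  decreasing_by all_goals omega

def count_obstacle_alt (array : List Int) (target_height : Int) : Int :=
  pvGoB array target_height 0 array.length

-- ===== PRECONDITION & SPEC =====
def Spec_count_obstacle (array : List Int) (target_height : Int) (out : Int) : Prop := out = count_obstacle_alt array target_height
instance (array : List Int) (target_height : Int) (out : Int) : Decidable (Spec_count_obstacle array target_height out) := by unfold Spec_count_obstacle; infer_instance

-- ===== CLAIM (what is proved, stated in full; the proofs are below) =====
def Claim_equal_count_obstacle : Prop := ∀ (array : List Int) (target_height : Int), Dom_count_obstacle array target_height → Spec_count_obstacle array target_height (count_obstacle array target_height)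

-- ===== LEMMAS AND PROOFS =====
-- The fueled loop at any window [start, e] of size `size = e - start + 1` with enough fuel
-- equals B's size recursion started at (start, size).
theorem pvLoopA_eq_pvGoB (array : List Int) (target_height : Int) :
    ∀ (size fuel : Nat) (start e : Int), e - start + 1 = (size : Int) → size ≤ fuel →
      pvLoopA array target_height fuel start e = pvGoB array target_height start size := by
  intro size
  induction size using Nat.strong_induction_on with
  | _ size ih =>
    intro fuel start e hsz hfuel
    cases size with
    | zero =>
      have he : ¬ start ≤ e := by omega
      cases fuel with
      | zero => simp [pvLoopA, pvGoB]
      | succ f => simp [pvLoopA, pvGoB, he]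
    | succ n =>
      cases fuel with
      | zero => omega
      | succ f =>
        have hle : start ≤ e := by omega
        have hmid : PySem.Int.floordiv (start + e) 2 = start + ((n / 2 : Nat) : Int) := by
          rw [PySem.Int.floordiv_eq_ediv_of_pos (by omega)]
          omega
        simp only [pvLoopA, pvGoB, if_pos hle, hmid]
        by_cases hc :
            (PySem.List.pyGet? array (start + ((n / 2 : Nat) : Int))).getD 0 < target_height
        · rw [if_pos hc, if_pos hc]
          exact ih (n - n / 2) (by omega) f (start + ((n / 2 : Nat) : Int) + 1) e
            (by omega) (by omega)
        · rw [if_neg hc, if_neg hc]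
          exact ih (n / 2) (by omega) f start (start + ((n / 2 : Nat) : Int) - 1)
            (by omega) (by omega)

-- ===== VERDICT (by name: the statement is the Claim_ definition above) =====
theorem count_obstacle_spec : Claim_equal_count_obstacle := by
  intro array target_height _
  unfold Spec_count_obstacle count_obstacle count_obstacle_alt
  exact pvLoopA_eq_pvGoB array target_height array.length (array.length + 1) 0
    ((array.length : Int) - 1) (by omega) (by omega)
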